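-- pv_equiv track=rewrite | github.com/pypi-data/pypi-mirror-392 | packages/tiktok-afriton/tiktok_afriton-0.2.tar.gz/tiktok_afriton-0.2/TIK_afrit/AFRI.py | bytes2string_1
-- ===== SOURCE A (Python) =====
-- def bytes2string_1(a, b="", c=False):
--     d = 'Dkdpgh4ZKsQB80/Mfvw36XI1R25+WUAlEi7NLboqYTOPuzmFjJnryx9HVGcaStCe'
--     e = ''
--     if c:
--         e = ''
--     if b:
--         d = b
--     g = ''
--     h = 0
--     while len(a) >= h + 3:
--         f = 0
--         f |= ord(a[h]) << 16
--         f |= ord(a[h + 1]) << 8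
--         f |= ord(a[h + 2]) << 0
--         g += d[(16515072 & f) >> 18]
--         g += d[(258048 & f) >> 12]
--         g += d[(4032 & f) >> 6]
--         g += d[63 & f]
--         h += 3
--     if len(a) - h > 0:
--         f = (255 & ord(a[h])) << 16
--         if len(a) > h + 1:
--             f |= (255 & ord(a[h + 1])) << 8
--         g += d[(16515072 & f) >> 18]
--         g += d[(258048 & f) >> 12]
--         if len(a) > h + 1:
--             g += d[(4032 & f) >> 6]
--         else:
--             g += e
--         g += e
--     return g
-- ===== SOURCE B (Python) =====
-- def bytes2string_1(a, b="", c=False):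
--     d = b or 'Dkdpgh4ZKsQB80/Mfvw36XI1R25+WUAlEi7NLboqYTOPuzmFjJnryx9HVGcaStCe'
--     n = len(a)
--     s = a + '\0' * (-n % 3)
--     parts = []
--     for i in range(0, len(s), 3):
--         f = (ord(s[i]) << 16) | (ord(s[i + 1]) << 8) | ord(s[i + 2])
--         parts.append(d[f >> 18] + d[(f >> 12) & 63] + d[(f >> 6) & 63] + d[f & 63])
--     keep = 4 * (n // 3) + (0, 2, 3)[n % 3]
--     return ''.join(parts)[:keep]
-- ===== Notes on version B (the rewrite author's own statement) =====
-- stated objective: simpler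
-- what changed: A's main loop plus a special two-branch tail is replaced by padding the input with NULs to a multiple of 3, one uniform 4-chars-per-group loop, and a final truncation of the output to the exact length 4*(n//3)+(0,2,3)[n%3].
-- outside the precondition, e.g. on bytes2string_1(' ', '012345678', False): A returns '80', B returns '80'
import Mathlib
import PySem

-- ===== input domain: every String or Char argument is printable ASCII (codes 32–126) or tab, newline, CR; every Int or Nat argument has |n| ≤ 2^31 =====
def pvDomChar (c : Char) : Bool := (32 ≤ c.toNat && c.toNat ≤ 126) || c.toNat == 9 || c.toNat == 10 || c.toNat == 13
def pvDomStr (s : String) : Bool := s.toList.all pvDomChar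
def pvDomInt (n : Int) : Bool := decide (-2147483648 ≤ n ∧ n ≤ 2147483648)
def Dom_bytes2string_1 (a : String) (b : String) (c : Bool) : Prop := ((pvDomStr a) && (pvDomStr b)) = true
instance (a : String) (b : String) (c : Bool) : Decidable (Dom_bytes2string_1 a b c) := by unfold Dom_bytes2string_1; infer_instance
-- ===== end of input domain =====

-- B replaces A's main-loop-plus-special-tail with NUL-padding, one uniform per-group loop, and a
-- final truncation to the exact output length (objective: simpler).


-- ===== PORT A =====
-- d[i] for a character index.  Python raises IndexError when i is out of range; those inputs are
-- excluded by Pre_bytes2string_1, so the default character is never reached on admitted inputs.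
def pvIdx (d : List Char) (i : Nat) : Char := d.getD i '?'

-- the while-loop of A (groups of 3), whose exit falls through into A's tail branch
def pvALoop (d : List Char) (e : List Char) : List Char → List Char
  | c1 :: c2 :: c3 :: rest =>
      let f := ((0 ||| (c1.toNat <<< 16)) ||| (c2.toNat <<< 8)) ||| (c3.toNat <<< 0)
      pvIdx d ((16515072 &&& f) >>> 18) :: pvIdx d ((258048 &&& f) >>> 12) ::
        pvIdx d ((4032 &&& f) >>> 6) :: pvIdx d (63 &&& f) :: pvALoop d e rest
  | [c1] =>
      let f := (255 &&& c1.toNat) <<< 16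
      pvIdx d ((16515072 &&& f) >>> 18) :: pvIdx d ((258048 &&& f) >>> 12) :: (e ++ e)
  | [c1, c2] =>
      let f := ((255 &&& c1.toNat) <<< 16) ||| ((255 &&& c2.toNat) <<< 8)
      pvIdx d ((16515072 &&& f) >>> 18) :: pvIdx d ((258048 &&& f) >>> 12) ::
        pvIdx d ((4032 &&& f) >>> 6) :: e
  | [] => []

def bytes2string_1 (a : String) (b : String) (c : Bool) : String :=
  let d := "Dkdpgh4ZKsQB80/Mfvw36XI1R25+WUAlEi7NLboqYTOPuzmFjJnryx9HVGcaStCe"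
  let e := ""
  let e := if c then "" else e
  let d := if b ≠ "" then b else d
  String.mk (pvALoop d.toList e.toList a.toList)

-- ===== PORT B =====
-- the uniform per-group loop of B over the NUL-padded input (length a multiple of 3)
def pvBLoop (d : List Char) : List Char → List Char
  | c1 :: c2 :: c3 :: rest =>
      let f := (c1.toNat <<< 16) ||| ((c2.toNat <<< 8) ||| c3.toNat)
      pvIdx d (f >>> 18) :: pvIdx d ((f >>> 12) &&& 63) ::
        pvIdx d ((f >>> 6) &&& 63) :: pvIdx d (f &&& 63) :: pvBLoop d rest
  | _ => []

def bytes2string_1_alt (a : String) (b : String) (c : Bool) : String :=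
  let d := if b ≠ "" then b else "Dkdpgh4ZKsQB80/Mfvw36XI1R25+WUAlEi7NLboqYTOPuzmFjJnryx9HVGcaStCe"
  let cs := a.toList
  let n := cs.length
  let s := cs ++ List.replicate ((3 - n % 3) % 3) (Char.ofNat 0)
  let keep := 4 * (n / 3) + (if n % 3 = 1 then 2 else if n % 3 = 2 then 3 else 0)
  String.mk ((pvBLoop d.toList s).take keep)

-- ===== PRECONDITION & SPEC =====
-- Pre_ excludes nonempty custom alphabets b shorter than 64 characters (unless a = "", so no
-- indexing happens at all): there A indexes d = b with 6-bit values and raises IndexError on most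
-- inputs; on the few such inputs whose indices all stay below len(b), A still returns (see cites).
def Pre_bytes2string_1 (a : String) (b : String) (c : Bool) : Prop :=
  b = "" ∨ 64 ≤ b.toList.length ∨ a = ""
instance (a : String) (b : String) (c : Bool) : Decidable (Pre_bytes2string_1 a b c) := by
  unfold Pre_bytes2string_1; infer_instance

def pvWitness_bytes2string_1 : String × String × Bool := ("abcd", "", false)

def Spec_bytes2string_1 (a : String) (b : String) (c : Bool) (out : String) : Prop := out = bytes2string_1_alt a b c
instance (a : String) (b : String) (c : Bool) (out : String) : Decidable (Spec_bytes2string_1 a b c out) := by unfold Spec_bytes2string_1; infer_instance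

-- ===== CLAIM (what is proved, stated in full; the proofs are below) =====
def Claim_equal_bytes2string_1 : Prop := ∀ (a : String) (b : String) (c : Bool), Dom_bytes2string_1 a b c → Pre_bytes2string_1 a b c → Spec_bytes2string_1 a b c (bytes2string_1 a b c)

-- ===== LEMMAS AND PROOFS =====

-- (16515072, 258048, 4032) = 63 <<< (18, 12, 6): shifting the mask through the &&&
theorem pv_mask_shift (m k f : Nat) (hm : m = 63 <<< k) : ((m &&& f) >>> k) = (f >>> k) &&& 63 := by
  subst hm
  rw [Nat.shiftRight_and_distrib, Nat.shiftLeft_shiftRight, Nat.and_comm]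

theorem pv_and63_of_lt {x : Nat} (h : x < 64) : x &&& 63 = x := by
  have : x &&& 63 = x % 64 := Nat.and_two_pow_sub_one_eq_mod x 6
  rw [this, Nat.mod_eq_of_lt h]

theorem pv_and255_of_lt {x : Nat} (h : x < 256) : 255 &&& x = x := by
  rw [Nat.and_comm]
  have : x &&& 255 = x % 256 := Nat.and_two_pow_sub_one_eq_mod x 8
  rw [this, Nat.mod_eq_of_lt h]

theorem pv_or_lt {x y n : Nat} (hx : x < 2 ^ n) (hy : y < 2 ^ n) : x ||| y < 2 ^ n := by
  have := Nat.or_lt_two_pow (x := x) (y := y) hx hy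
  exact this

-- the first emitted index: A's masked form equals B's plain shift when f < 2^24
theorem pv_first_idx {f : Nat} (h : f < 2 ^ 24) : (16515072 &&& f) >>> 18 = f >>> 18 := by
  rw [pv_mask_shift 16515072 18 f (by decide)]
  exact pv_and63_of_lt (by
    have : f >>> 18 = f / 2 ^ 18 := Nat.shiftRight_eq_div_pow f 18
    rw [this]; omega)

theorem pv_shl_lt (c k : Nat) (hc : c < 256) (hk : k ≤ 16) : c <<< k < 2 ^ 24 := by
  rw [Nat.shiftLeft_eq]
  have h2 : (2:Nat) ^ k ≤ 2 ^ 16 := Nat.pow_le_pow_right (by decide) hk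
  have h3 : c * 2 ^ k ≤ 255 * 2 ^ 16 := Nat.mul_le_mul (by omega) h2
  norm_num at h3 ⊢
  omega

-- the loop invariant: A's loop-plus-tail equals B's padded loop truncated to the exact length
theorem pv_loop_eq (d : List Char) (cs : List Char) (h : ∀ ch ∈ cs, ch.toNat < 256) :
    pvALoop d [] cs =
      (pvBLoop d (cs ++ List.replicate ((3 - cs.length % 3) % 3) (Char.ofNat 0))).take
        (4 * (cs.length / 3) +
          (if cs.length % 3 = 1 then 2 else if cs.length % 3 = 2 then 3 else 0)) := by
  match cs with
  | c1 :: c2 :: c3 :: rest =>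
    have hc1 : c1.toNat < 256 := h c1 (by simp)
    have hc2 : c2.toNat < 256 := h c2 (by simp)
    have hc3 : c3.toNat < 256 := h c3 (by simp)
    have ih := pv_loop_eq d rest (fun ch hm => h ch (by simp [hm]))
    have hf : ((0 ||| (c1.toNat <<< 16)) ||| (c2.toNat <<< 8)) ||| (c3.toNat <<< 0)
        = (c1.toNat <<< 16) ||| ((c2.toNat <<< 8) ||| c3.toNat) := by
      rw [Nat.zero_or, Nat.shiftLeft_zero, Nat.or_assoc]
    set f := (c1.toNat <<< 16) ||| ((c2.toNat <<< 8) ||| c3.toNat) with hfdef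
    have hflt : f < 2 ^ 24 := by
      apply pv_or_lt (pv_shl_lt c1.toNat 16 hc1 (by decide))
      apply pv_or_lt (pv_shl_lt c2.toNat 8 hc2 (by decide))
      calc c3.toNat < 256 := hc3
        _ < 2 ^ 24 := by decide
    have hlen : (c1 :: c2 :: c3 :: rest).length = rest.length + 3 := by simp
    rw [hlen] at *
    have hmod : (rest.length + 3) % 3 = rest.length % 3 := Nat.add_mod_right _ _
    have hdiv : (rest.length + 3) / 3 = rest.length / 3 + 1 := Nat.add_div_right _ (by decide)
    simp only [pvALoop, pvBLoop, hf, hmod, hdiv, List.cons_append]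
    rw [show 4 * (rest.length / 3 + 1) +
          (if rest.length % 3 = 1 then 2 else if rest.length % 3 = 2 then 3 else 0)
        = (4 * (rest.length / 3) +
          (if rest.length % 3 = 1 then 2 else if rest.length % 3 = 2 then 3 else 0)) + 1 + 1 + 1 + 1
      from by ring]
    simp only [List.take_succ_cons]
    rw [pv_first_idx hflt,
        pv_mask_shift 258048 12 f (by decide), pv_mask_shift 4032 6 f (by decide),
        Nat.and_comm 63 f]
    exact congrArg _ (congrArg _ (congrArg _ (congrArg _ ih)))
  | [c1] =>
    have hc1 : c1.toNat < 256 := h c1 (by simp)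
    have hf : (255 &&& c1.toNat) <<< 16 = c1.toNat <<< 16 := by rw [pv_and255_of_lt hc1]
    have hflt : c1.toNat <<< 16 < 2 ^ 24 := pv_shl_lt c1.toNat 16 hc1 (by decide)
    have hz : (Char.ofNat 0).toNat = 0 := by decide
    have e1 : (16515072 &&& c1.toNat <<< 16) >>> 18 = (c1.toNat <<< 16) >>> 18 :=
      pv_first_idx hflt
    have e2 : (258048 &&& c1.toNat <<< 16) >>> 12 = ((c1.toNat <<< 16) >>> 12) &&& 63 :=
      pv_mask_shift 258048 12 _ (by decide)
    simp only [pvALoop, hf, List.length_cons, List.length_nil]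
    norm_num [List.replicate]
    simp [pvBLoop, hz, Nat.or_zero, Nat.zero_shiftLeft, List.take_succ_cons, e1, e2]
  | [c1, c2] =>
    have hc1 : c1.toNat < 256 := h c1 (by simp)
    have hc2 : c2.toNat < 256 := h c2 (by simp)
    have hf : ((255 &&& c1.toNat) <<< 16) ||| ((255 &&& c2.toNat) <<< 8)
        = (c1.toNat <<< 16) ||| ((c2.toNat <<< 8) ||| (Char.ofNat 0).toNat) := by
      rw [pv_and255_of_lt hc1, pv_and255_of_lt hc2]
      simp [Nat.or_zero]
    have hflt2 : (c1.toNat <<< 16) ||| (c2.toNat <<< 8) < 2 ^ 24 :=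
      pv_or_lt (pv_shl_lt c1.toNat 16 hc1 (by decide)) (pv_shl_lt c2.toNat 8 hc2 (by decide))
    have e1 : (16515072 &&& ((c1.toNat <<< 16) ||| (c2.toNat <<< 8))) >>> 18
        = ((c1.toNat <<< 16) ||| (c2.toNat <<< 8)) >>> 18 := pv_first_idx hflt2
    have e2 : (258048 &&& ((c1.toNat <<< 16) ||| (c2.toNat <<< 8))) >>> 12
        = (((c1.toNat <<< 16) ||| (c2.toNat <<< 8)) >>> 12) &&& 63 :=
      pv_mask_shift 258048 12 _ (by decide)
    have e3 : (4032 &&& ((c1.toNat <<< 16) ||| (c2.toNat <<< 8))) >>> 6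
        = (((c1.toNat <<< 16) ||| (c2.toNat <<< 8)) >>> 6) &&& 63 :=
      pv_mask_shift 4032 6 _ (by decide)
    simp only [pvALoop, hf, List.length_cons, List.length_nil]
    norm_num [List.replicate]
    simp [pvBLoop, List.take_succ_cons, e1, e2, e3]
  | [] => rfl
termination_by cs.length

theorem pv_dom_chars {s : String} (h : pvDomStr s = true) : ∀ ch ∈ s.toList, ch.toNat < 256 := by
  intro ch hm
  have := List.all_eq_true.mp h ch hm
  simp only [pvDomChar, Bool.or_eq_true, Bool.and_eq_true, decide_eq_true_eq, beq_iff_eq] at this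
  omega

-- ===== VERDICT (by name: the statement is the Claim_ definition above) =====
theorem bytes2string_1_spec : Claim_equal_bytes2string_1 := by
  intro a b c hdom _
  unfold Spec_bytes2string_1 bytes2string_1 bytes2string_1_alt
  simp only [Dom_bytes2string_1, Bool.and_eq_true] at hdom
  cases c <;>
    exact congrArg String.mk (pv_loop_eq _ a.toList (pv_dom_chars hdom.1))
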